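-- pv_equiv track=rewrite | github.com/alrini/algo-study | programmers/길 찾기 게임 [Lv3]/njw1204.py | solution
-- ===== SOURCE A (Python) =====
-- def dfs(node, min_x, max_x, in_nodes_of_height, out_preorder, out_postorder):
--     cur_x = node[0][1]
--     cur_no = node[1]
--     next_height = node[0][0] - 1
--
--     out_preorder.append(cur_no)
--
--     while next_height >= 0 and in_nodes_of_height[next_height]:
--         next_node = in_nodes_of_height[next_height][-1]
--         next_x = next_node[0][1]
--         next_no = next_node[1]
--
--         if min_x <= next_x <= max_x:
--             in_nodes_of_height[next_height].pop()
--
--             if next_x < cur_x: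
--                 dfs(next_node, min_x, cur_x - 1, in_nodes_of_height, out_preorder, out_postorder)
--             else:
--                 dfs(next_node, cur_x + 1, max_x, in_nodes_of_height, out_preorder, out_postorder)
--         else:
--             break
--
--     out_postorder.append(cur_no)
--
-- def solution(nodeinfo):
--     y_comp = {i: n for n, i in enumerate(sorted(set([i[1] for i in nodeinfo])))}
--
--     nodes_of_heights = {i: list() for i in range(1005)}
--     max_height = -1
--     root_node = -1
--
--     for node in sorted([((y_comp[i[1]], i[0]), n + 1) for n, i in enumerate(nodeinfo)], reverse=True):
--         nodes_of_heights[node[0][0]].append(node)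
--
--         if node[0][0] > max_height:
--             max_height = node[0][0]
--             root_node = node
--
--     ans = [[], []]
--     dfs(root_node, -1, 10 ** 9, nodes_of_heights, ans[0], ans[1])
--     return ans
-- ===== SOURCE B (Python) =====
-- def solution(nodeinfo):
--     rank = {y: r for r, y in enumerate(sorted({p[1] for p in nodeinfo}))}
--     order = sorted((((rank[p[1]], p[0]), i + 1) for i, p in enumerate(nodeinfo)), reverse=True)
--
--     levels = {}
--     for nd in reversed(order):
--         h = nd[0][0]
--         levels[h] = levels.get(h, []) + [nd]
--
--     root = max(order, key=lambda nd: nd[0][0])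
--
--     def build(node, lo, hi):
--         (h, x), label = node
--         kids = []
--         g = h - 1
--         while levels.get(g, []):
--             child = levels[g][0]
--             cx = child[0][1]
--             if lo <= cx <= hi:
--                 levels[g] = levels[g][1:]
--                 kids.append(build(child, lo, x - 1) if cx < x else build(child, x + 1, hi))
--             else:
--                 break
--         return (label, kids)
--
--     tree = build(root, -1, 10 ** 9)
--
--     def preorder(t):
--         return [t[0]] + [u for c in t[1] for u in preorder(c)]
--
--     def postorder(t):
--         return [u for c in t[1] for u in postorder(c)] + [t[0]]
--
--     return [preorder(tree), postorder(tree)]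
-- ===== Notes on version B (the rewrite author's own statement) =====
-- stated objective: idiomatic
-- what changed: B separates construction from output: it builds an explicit tree once (children attached by the same level-by-level range consumption, but taken from the front of ascending per-level queues kept in a plain dict that holds only the levels that exist, with the root found by max()) and then derives preorder and postorder by two pure recursive traversals, whereas A preallocates a 1005-entry dict of level stacks and runs one DFS that mutates those stacks and both output lists in place.
import Mathlib
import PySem

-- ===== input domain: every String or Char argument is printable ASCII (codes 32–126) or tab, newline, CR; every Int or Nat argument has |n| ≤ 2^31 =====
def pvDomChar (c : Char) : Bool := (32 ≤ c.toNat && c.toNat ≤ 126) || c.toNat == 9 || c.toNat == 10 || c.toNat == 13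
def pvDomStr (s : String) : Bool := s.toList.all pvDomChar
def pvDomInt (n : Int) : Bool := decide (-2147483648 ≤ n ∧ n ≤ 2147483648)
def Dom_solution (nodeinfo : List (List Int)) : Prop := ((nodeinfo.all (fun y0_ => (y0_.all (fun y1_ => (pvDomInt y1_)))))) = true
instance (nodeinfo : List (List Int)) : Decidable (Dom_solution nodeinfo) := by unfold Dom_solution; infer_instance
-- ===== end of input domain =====

-- B separates tree construction (an explicit tree built once) from two pure traversals, finds
-- the root with max() and keeps only the levels that exist in a plain dict consumed from the
-- front, instead of A's single DFS that mutates a preallocated 1005-entry dict of level stacks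
-- and the two output lists in place (objective: idiomatic; same consumption order, so same cost).

-- ===== PORT A =====
abbrev PVNode : Type := (Int × Int) × Int
abbrev PVSt : Type := PySem.Dict Int (List PVNode) × List Int × List Int

def pvDummy : PVNode := ((0, 0), 0)

-- Shared preprocessing: Source A and Source B contain the identical lines
--   {y: r for r, y in enumerate(sorted({p[1] for p in nodeinfo}))}   and
--   sorted([((rank[p[1]], p[0]), i + 1) for i, p in enumerate(nodeinfo)], reverse=True).
-- Python's lexicographic `<` on these int tuples, ported by hand (exact):
def pvLexLt (a b : PVNode) : Bool :=
  a.1.1 < b.1.1 || (a.1.1 == b.1.1 && (a.1.2 < b.1.2 || (a.1.2 == b.1.2 && a.2 < b.2)))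

-- hand port of sorted(xs, reverse=True) on int tuples: PySem.List.sorted's reverse rule
-- (insertion with before a b = key b < key a), with the tuple `<` above as the key order.
def pvSortDesc (xs : List PVNode) : List PVNode :=
  xs.foldl (fun acc x => PySem.List.insertBy (fun a b => pvLexLt b a) x acc) []

def pvYComp (nodeinfo : List (List Int)) : PySem.Dict Int Int :=
  (PySem.List.enumerate
      (PySem.List.sorted (PySem.Set.ofList (nodeinfo.map (fun p => PySem.List.pyGetD p 1 0)))
        (fun y => y) false) 0).foldl
    (fun d ni => d.insert ni.2 ni.1) (PySem.Dict.mk [])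

def pvItems (nodeinfo : List (List Int)) : List PVNode :=
  (PySem.List.enumerate nodeinfo 0).map (fun np =>
    (((pvYComp nodeinfo).getD (PySem.List.pyGetD np.2 1 0) 0, PySem.List.pyGetD np.2 0 0),
      np.1 + 1))

-- dfs / its while loop; the Nat argument is fuel, a totality guard only (2*len+2 is ample:
-- every decrement follows a pop of one of the ≤ len pooled nodes, or the root call).
mutual
def pvDfsA : Nat → PVNode → Int → Int → PVSt → PVSt
  | f, nd, _lo, _hi, (pool, pre, post) =>
    let st := pvLoopA f nd.1.2 (nd.1.1 - 1) _lo _hi (pool, pre ++ [nd.2], post)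
    (st.1, st.2.1, st.2.2 ++ [nd.2])
termination_by f _ _ _ _ => (f, 1)

def pvLoopA : Nat → Int → Int → Int → Int → PVSt → PVSt
  | 0, _, _, _, _, st => st
  | Nat.succ f, curX, nh, lo, hi, (pool, pre, post) =>
    let lvl := pool.getD nh []
    if 0 ≤ nh ∧ lvl ≠ [] then
      let nxt := lvl.getLast?.getD pvDummy   -- level[-1] of a nonempty list: exact
      if lo ≤ nxt.1.2 ∧ nxt.1.2 ≤ hi then
        let pool' := pool.insert nh lvl.dropLast   -- level.pop()
        let st' := if nxt.1.2 < curX then pvDfsA f nxt lo (curX - 1) (pool', pre, post)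
                   else pvDfsA f nxt (curX + 1) hi (pool', pre, post)
        pvLoopA f curX nh lo hi st'
      else (pool, pre, post)
    else (pool, pre, post)
termination_by f _ _ _ _ _ => (f, 0)
end

def solution (nodeinfo : List (List Int)) : List (List Int) :=
  let order := pvSortDesc (pvItems nodeinfo)
  -- {i: list() for i in range(1005)}
  let preset := (PySem.List.pyRange 0 1005 1).foldl
      (fun d i => d.insert i ([] : List PVNode)) (PySem.Dict.mk [])
  -- nodes_of_heights[node[0][0]].append(node)  (key present under Pre_: modify is exact)
  let pool := order.foldl (fun d nd => d.modify nd.1.1 [] (fun l => l ++ [nd])) preset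
  -- max_height / root_node tracking loop (root_node = -1 sentinel replaced by a dummy node;
  -- it survives only on the empty input, which is outside Pre_)
  let rs := order.foldl (fun s nd => if nd.1.1 > s.1 then (nd.1.1, nd) else s)
      ((-1 : Int), pvDummy)
  let st := pvDfsA (2 * nodeinfo.length + 2) rs.2 (-1) (10 ^ 9) (pool, [], [])
  [st.2.1, st.2.2]

-- ===== PORT B =====
mutual
inductive PVTree : Type where
  | node : Int → PVForest → PVTree
deriving DecidableEq, Repr

inductive PVForest : Type where
  | nil : PVForest
  | cons : PVTree → PVForest → PVForest
deriving DecidableEq, Repr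
end

mutual
def pvPreT : PVTree → List Int
  | .node v ts => v :: pvPreF ts
def pvPreF : PVForest → List Int
  | .nil => []
  | .cons t ts => pvPreT t ++ pvPreF ts
end

mutual
def pvPostT : PVTree → List Int
  | .node v ts => pvPostF ts ++ [v]
def pvPostF : PVForest → List Int
  | .nil => []
  | .cons t ts => pvPostT t ++ pvPostF ts
end

-- build / its while loop; fuel is the same totality guard as in port A.
mutual
def pvBuildB : Nat → PVNode → Int → Int → PySem.Dict Int (List PVNode) →
    PVTree × PySem.Dict Int (List PVNode)
  | f, nd, lo, hi, pool =>
    let r := pvKidsB f nd.1.2 (nd.1.1 - 1) lo hi pool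
    (.node nd.2 r.1, r.2)
termination_by f _ _ _ _ => (f, 1)

def pvKidsB : Nat → Int → Int → Int → Int → PySem.Dict Int (List PVNode) →
    PVForest × PySem.Dict Int (List PVNode)
  | 0, _, _, _, _, pool => (.nil, pool)
  | Nat.succ f, curX, g, lo, hi, pool =>
    match pool.getD g [] with                    -- while levels.get(g, []):
    | [] => (.nil, pool)
    | c :: rest =>
      if lo ≤ c.1.2 ∧ c.1.2 ≤ hi then
        let pool' := pool.insert g rest          -- levels[g] = levels[g][1:]
        let tr := if c.1.2 < curX then pvBuildB f c lo (curX - 1) pool'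
                  else pvBuildB f c (curX + 1) hi pool'
        let ts := pvKidsB f curX g lo hi tr.2
        (.cons tr.1 ts.1, ts.2)
      else (.nil, pool)
termination_by f _ _ _ _ _ => (f, 0)
end

def solution_alt (nodeinfo : List (List Int)) : List (List Int) :=
  let order := pvSortDesc (pvItems nodeinfo)
  -- for nd in reversed(order): levels[h] = levels.get(h, []) + [nd]
  let levels := order.reverse.foldl
      (fun d nd => d.insert nd.1.1 (d.getD nd.1.1 [] ++ [nd])) (PySem.Dict.mk [])
  -- root = max(order, key=lambda nd: nd[0][0])  (nonempty under Pre_)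
  let root := (PySem.List.max? order (fun nd => nd.1.1)).getD pvDummy
  let t := (pvBuildB (2 * nodeinfo.length + 2) root (-1) (10 ^ 9) levels).1
  [pvPreT t, pvPostT t]

-- ===== PRECONDITION & SPEC =====
-- Pre_ excludes exactly the inputs where Source A raises: an empty list (root_node stays the int -1
-- and dfs subscripts it: TypeError), an inner list with fewer than two entries (IndexError on
-- i[1]), and more than 1005 distinct y values (KeyError on A's preallocated dict of 1005 levels).
def Pre_solution (nodeinfo : List (List Int)) : Prop :=
  nodeinfo ≠ [] ∧ (∀ p ∈ nodeinfo, 2 ≤ p.length) ∧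
  (PySem.List.dedup (nodeinfo.map (fun p => PySem.List.pyGetD p 1 0))).length ≤ 1005

instance (nodeinfo : List (List Int)) : Decidable (Pre_solution nodeinfo) := by
  unfold Pre_solution; infer_instance

def pvWitness_solution : List (List Int) := [[5, 3], [11, 5], [13, 3], [3, 5], [6, 1], [1, 3], [8, 6], [7, 2], [2, 2]]

def Spec_solution (nodeinfo : List (List Int)) (out : List (List Int)) : Prop := out = solution_alt nodeinfo
instance (nodeinfo : List (List Int)) (out : List (List Int)) : Decidable (Spec_solution nodeinfo out) := by unfold Spec_solution; infer_instance

-- ===== CLAIM (what is proved, stated in full; the proofs are below) =====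
def Claim_equal_solution : Prop := ∀ (nodeinfo : List (List Int)), Dom_solution nodeinfo → Pre_solution nodeinfo → Spec_solution nodeinfo (solution nodeinfo)

-- ===== LEMMAS AND PROOFS =====

-- dictionary basics
theorem pvGetD_insert {ν : Type} (d : PySem.Dict Int ν) (k h : Int) (v dflt : ν) :
    (d.insert k v).getD h dflt = if h = k then v else d.getD h dflt := by
  by_cases hk : h = k
  · subst hk; simp [PySem.Dict.getD_insert_self]
  · simp [hk, PySem.Dict.getD, PySem.Dict.get?_insert_of_ne d v hk]

-- every value reachable in the preset {0..1004 : []} dict is []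
theorem pvPresetGetD (l : List Int) (d : PySem.Dict Int (List PVNode))
    (hd : ∀ h : Int, d.getD h [] = []) :
    ∀ h : Int, (l.foldl (fun d i => d.insert i ([] : List PVNode)) d).getD h [] = [] := by
  induction l generalizing d with
  | nil => exact hd
  | cons i l ih =>
    intro h
    simp only [List.foldl_cons]
    exact ih _ (fun h' => by rw [pvGetD_insert]; split <;> simp [hd]) h

-- B's level-building fold, characterised
theorem pvFoldIns_getD (l : List PVNode) :
    ∀ (d : PySem.Dict Int (List PVNode)) (h : Int),
    (l.foldl (fun d nd => d.insert nd.1.1 (d.getD nd.1.1 [] ++ [nd])) d).getD h []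
      = d.getD h [] ++ l.filter (fun nd => nd.1.1 == h) := by
  induction l with
  | nil => simp
  | cons c l ih =>
    intro d h
    simp only [List.foldl_cons, ih, List.filter_cons]
    rw [pvGetD_insert]
    by_cases hc : h = c.1.1
    · simp [hc, List.append_assoc]
    · have : ¬ (c.1.1 == h) = true := by simpa using fun e => hc e.symm
      simp [hc, this]

-- membership through the hand insertion sort
theorem pvMem_sortDesc (xs : List PVNode) (a : PVNode) (h : a ∈ pvSortDesc xs) : a ∈ xs := by
  unfold pvSortDesc at h
  suffices H : ∀ (l : List PVNode) (acc : List PVNode),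
      a ∈ l.foldl (fun acc x => PySem.List.insertBy (fun a b => pvLexLt b a) x acc) acc →
      a ∈ acc ∨ a ∈ l by
    rcases H xs [] h with h' | h'
    · simp at h'
    · exact h'
  intro l
  induction l with
  | nil => intro acc h; exact Or.inl h
  | cons x l ih =>
    intro acc h
    rcases ih _ h with h' | h'
    · rcases (PySem.List.mem_insertBy _ _ _ _).mp h' with rfl | h''
      · simp
      · exact Or.inl h''
    · simp [h']

theorem pvLength_insertBy (b : PVNode → PVNode → Bool) (x : PVNode) (l : List PVNode) :
    (PySem.List.insertBy b x l).length = l.length + 1 := by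
  induction l with
  | nil => rfl
  | cons y ys ih =>
    simp only [PySem.List.insertBy]
    split <;> simp [ih]

theorem pvLength_sortDesc (xs : List PVNode) : (pvSortDesc xs).length = xs.length := by
  unfold pvSortDesc
  suffices H : ∀ (l acc : List PVNode),
      (l.foldl (fun acc x => PySem.List.insertBy (fun a b => pvLexLt b a) x acc) acc).length
        = acc.length + l.length by
    simpa using H xs []
  intro l
  induction l with
  | nil => simp
  | cons x l ih => intro acc; simp [ih, pvLength_insertBy]; omega

-- enumerate indices are ≥ start
theorem pvEnum_fst_ge {α : Type} (xs : List α) :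
    ∀ (s : Int) (p : Int × α), p ∈ PySem.List.enumerate xs s → s ≤ p.1 := by
  induction xs with
  | nil => intro s p h; simp [PySem.List.enumerate] at h
  | cons x xs ih =>
    intro s p h
    simp only [PySem.List.enumerate, List.mem_cons] at h
    rcases h with rfl | h
    · simp
    · have := ih (s + 1) p h; omega

-- all values of the y-compression dict are ≥ 0
theorem pvYComp_getD_nonneg (nodeinfo : List (List Int)) (y : Int) :
    0 ≤ (pvYComp nodeinfo).getD y 0 := by
  unfold pvYComp
  have H : ∀ (l : List (Int × Int)) (d : PySem.Dict Int Int),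
      (∀ k : Int, 0 ≤ d.getD k 0) → (∀ p ∈ l, 0 ≤ p.1) →
      ∀ k : Int, 0 ≤ (l.foldl (fun d ni => d.insert ni.2 ni.1) d).getD k 0 := by
    intro l
    induction l with
    | nil => intro d hd _ k; exact hd k
    | cons p l ih =>
      intro d hd hl k
      simp only [List.foldl_cons]
      refine ih _ (fun k' => ?_) (fun q hq => hl q (by simp [hq])) k
      rw [pvGetD_insert]
      split
      · exact hl p (by simp)
      · exact hd k'
  refine H _ _ (fun k => by simp [PySem.Dict.getD, PySem.Dict.get?]) ?_ y
  intro p hp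
  exact pvEnum_fst_ge _ 0 p hp

theorem pvItems_h_nonneg (nodeinfo : List (List Int)) (nd : PVNode)
    (h : nd ∈ pvItems nodeinfo) : 0 ≤ nd.1.1 := by
  unfold pvItems at h
  rcases List.mem_map.mp h with ⟨np, _, rfl⟩
  exact pvYComp_getD_nonneg _ _

-- A's max_height/root_node fold is max(..., key=height)
def pvMaxF (acc : Option PVNode) (x : PVNode) : Option PVNode :=
  match acc with
  | none => some x
  | some m => if m.1.1 < x.1.1 then some x else some m

theorem pvMax?_eq (xs : List PVNode) :
    PySem.List.max? xs (fun nd => nd.1.1) = xs.foldl pvMaxF none := by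
  simp only [PySem.List.max?]
  congr 1
  funext acc x
  cases acc <;> rfl

theorem pvRootFold (l : List PVNode) :
    ∀ (r : PVNode),
    l.foldl (fun s nd => if nd.1.1 > s.1 then (nd.1.1, nd) else s) (r.1.1, r)
      = (((l.foldl pvMaxF (some r)).getD pvDummy).1.1,
         (l.foldl pvMaxF (some r)).getD pvDummy) := by
  induction l with
  | nil => intro r; simp
  | cons c l ih =>
    intro r
    simp only [List.foldl_cons, gt_iff_lt]
    by_cases h : r.1.1 < c.1.1 <;> simp [pvMaxF, h, ih]

-- the pool invariant: A's level stacks are B's level queues, reversed; negative keys are empty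
def pvR (dA dB : PySem.Dict Int (List PVNode)) : Prop :=
  ∀ h : Int, dA.getD h [] = (dB.getD h []).reverse ∧ (h < 0 → dB.getD h [] = [])

theorem pvR_insert {dA dB : PySem.Dict Int (List PVNode)} (h : pvR dA dB)
    (k : Int) (hk : 0 ≤ k) (lB : List PVNode) :
    pvR (dA.insert k lB.reverse) (dB.insert k lB) := by
  intro h'
  rw [pvGetD_insert, pvGetD_insert]
  split
  · exact ⟨rfl, fun hneg => by omega⟩
  · exact h h'

-- the statements of the simulation lemmas (proved below by induction on the shared fuel)
def PVLoopStmt (f : Nat) : Prop :=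
  ∀ (curX nh lo hi : Int) (dA dB : PySem.Dict Int (List PVNode)) (pre post : List Int),
    pvR dA dB →
    ∃ dA', pvLoopA f curX nh lo hi (dA, pre, post)
        = (dA', pre ++ pvPreF (pvKidsB f curX nh lo hi dB).1,
                post ++ pvPostF (pvKidsB f curX nh lo hi dB).1)
      ∧ pvR dA' (pvKidsB f curX nh lo hi dB).2

def PVDfsStmt (f : Nat) : Prop :=
  ∀ (nd : PVNode) (lo hi : Int) (dA dB : PySem.Dict Int (List PVNode)) (pre post : List Int),
    pvR dA dB →
    ∃ dA', pvDfsA f nd lo hi (dA, pre, post)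
        = (dA', pre ++ pvPreT (pvBuildB f nd lo hi dB).1,
                post ++ pvPostT (pvBuildB f nd lo hi dB).1)
      ∧ pvR dA' (pvBuildB f nd lo hi dB).2

theorem pvDfs_from_loop (f : Nat) (hf : PVLoopStmt f) : PVDfsStmt f := by
  intro nd lo hi dA dB pre post hR
  obtain ⟨dA', heq, hR'⟩ := hf nd.1.2 (nd.1.1 - 1) lo hi dA dB (pre ++ [nd.2]) post hR
  refine ⟨dA', ?_, ?_⟩
  · simp only [pvDfsA, pvBuildB, heq, pvPreT, pvPostT]
    simp
  · simpa [pvBuildB] using hR'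

theorem pvLoop_eq : ∀ f : Nat, PVLoopStmt f := by
  intro f
  induction f with
  | zero =>
    intro curX nh lo hi dA dB pre post hR
    exact ⟨dA, by simp [pvLoopA, pvKidsB, pvPreF, pvPostF], by simpa [pvKidsB] using hR⟩
  | succ f ih =>
    have dfsEq := pvDfs_from_loop f ih
    intro curX nh lo hi dA dB pre post hR
    have hlvl := (hR nh).1
    cases hB : dB.getD nh [] with
    | nil =>
      have hA : dA.getD nh [] = [] := by simp [hlvl, hB]
      refine ⟨dA, ?_, by simpa [pvKidsB, hB] using hR⟩
      simp [pvLoopA, pvKidsB, hA, hB, pvPreF, pvPostF]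
    | cons c rest =>
      have hnh : 0 ≤ nh := by
        by_contra hneg
        have := (hR nh).2 (by omega)
        simp [this] at hB
      have hA : dA.getD nh [] = rest.reverse ++ [c] := by
        simp [hlvl, hB]
      have hAne : dA.getD nh [] ≠ [] := by simp [hA]
      have hlast : (dA.getD nh []).getLast?.getD pvDummy = c := by
        simp [hA]
      have hdrop : (dA.getD nh []).dropLast = rest.reverse := by
        simp [hA]
      by_cases hrange : lo ≤ c.1.2 ∧ c.1.2 ≤ hi
      · -- pop + recurse, then continue the loop
        have hR' : pvR (dA.insert nh rest.reverse) (dB.insert nh rest) :=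
          pvR_insert hR nh hnh rest
        by_cases hdir : c.1.2 < curX
        · obtain ⟨dA1, he1, hR1⟩ :=
            dfsEq c lo (curX - 1) (dA.insert nh rest.reverse) (dB.insert nh rest) pre post hR'
          obtain ⟨dA2, he2, hR2⟩ :=
            ih curX nh lo hi dA1 (pvBuildB f c lo (curX - 1) (dB.insert nh rest)).2
              (pre ++ pvPreT (pvBuildB f c lo (curX - 1) (dB.insert nh rest)).1)
              (post ++ pvPostT (pvBuildB f c lo (curX - 1) (dB.insert nh rest)).1) hR1
          refine ⟨dA2, ?_, ?_⟩
          · simp only [pvLoopA, hAne, hnh, ne_eq, not_false_eq_true, and_true, if_pos,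
              hlast, hrange, hdir, pvKidsB, hB]
            rw [hdrop, he1, he2]
            simp [pvPreF, pvPostF, List.append_assoc]
          · simp only [pvKidsB, hB]
            simp [hrange, hdir]
            exact hR2
        · obtain ⟨dA1, he1, hR1⟩ :=
            dfsEq c (curX + 1) hi (dA.insert nh rest.reverse) (dB.insert nh rest) pre post hR'
          obtain ⟨dA2, he2, hR2⟩ :=
            ih curX nh lo hi dA1 (pvBuildB f c (curX + 1) hi (dB.insert nh rest)).2
              (pre ++ pvPreT (pvBuildB f c (curX + 1) hi (dB.insert nh rest)).1)
              (post ++ pvPostT (pvBuildB f c (curX + 1) hi (dB.insert nh rest)).1) hR1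
          refine ⟨dA2, ?_, ?_⟩
          · simp only [pvLoopA, hAne, hnh, ne_eq, not_false_eq_true, and_true, if_pos,
              hlast, hrange, hdir, if_false, pvKidsB, hB]
            rw [hdrop, he1, he2]
            simp [pvPreF, pvPostF, List.append_assoc]
          · simp only [pvKidsB, hB]
            simp [hrange, hdir]
            exact hR2
      · refine ⟨dA, ?_, by simpa [pvKidsB, hB, hrange] using hR⟩
        simp [pvLoopA, pvKidsB, hAne, hnh, hlast, hB, hrange, pvPreF, pvPostF]


theorem pvPoolInit (order : List PVNode) (hnn : ∀ nd ∈ order, 0 ≤ nd.1.1) :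
    pvR (order.foldl (fun d nd => d.modify nd.1.1 [] (fun l => l ++ [nd]))
          ((PySem.List.pyRange 0 1005 1).foldl
            (fun d i => d.insert i ([] : List PVNode)) (PySem.Dict.mk [])))
        (order.reverse.foldl
          (fun d nd => d.insert nd.1.1 (d.getD nd.1.1 [] ++ [nd])) (PySem.Dict.mk [])) := by
  intro h
  have hA : (order.foldl (fun d nd => d.modify nd.1.1 [] (fun l => l ++ [nd]))
        ((PySem.List.pyRange 0 1005 1).foldl
          (fun d i => d.insert i ([] : List PVNode)) (PySem.Dict.mk []))).getD h []
      = order.filter (fun nd => nd.1.1 == h) := by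
    have hmap : order.foldl (fun d nd => d.modify nd.1.1 [] (fun l => l ++ [nd]))
          ((PySem.List.pyRange 0 1005 1).foldl
            (fun d i => d.insert i ([] : List PVNode)) (PySem.Dict.mk []))
        = (order.map (fun nd => (nd.1.1, nd))).foldl
            (fun d p => d.modify p.1 [] (fun l => l ++ [p.2]))
            ((PySem.List.pyRange 0 1005 1).foldl
              (fun d i => d.insert i ([] : List PVNode)) (PySem.Dict.mk [])) := by
      rw [List.foldl_map]
    rw [hmap, PySem.Dict.getD_foldl_modify_append,
      pvPresetGetD _ _ (fun h' => by simp [PySem.Dict.getD, PySem.Dict.get?]),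
      List.filter_map, List.map_map]
    simp [Function.comp_def]
  have hB : (order.reverse.foldl
        (fun d nd => d.insert nd.1.1 (d.getD nd.1.1 [] ++ [nd])) (PySem.Dict.mk [])).getD h []
      = (order.filter (fun nd => nd.1.1 == h)).reverse := by
    rw [pvFoldIns_getD]
    simp [PySem.Dict.getD, PySem.Dict.get?, List.filter_reverse]
  constructor
  · rw [hA, hB, List.reverse_reverse]
  · intro hneg
    rw [hB, List.reverse_eq_nil_iff, List.filter_eq_nil_iff]
    intro nd hnd
    have := hnn nd hnd
    simp only [beq_iff_eq]
    omega

theorem pvRoot_eq (order : List PVNode) (hne : order ≠ []) (hnn : ∀ nd ∈ order, 0 ≤ nd.1.1) :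
    (order.foldl (fun s nd => if nd.1.1 > s.1 then (nd.1.1, nd) else s) ((-1 : Int), pvDummy)).2
      = (PySem.List.max? order (fun nd => nd.1.1)).getD pvDummy := by
  rw [pvMax?_eq]
  cases order with
  | nil => exact absurd rfl hne
  | cons o rest =>
    have h0 : 0 ≤ o.1.1 := hnn o (by simp)
    simp only [List.foldl_cons, gt_iff_lt]
    rw [if_pos (by omega : (-1 : Int) < o.1.1)]
    rw [pvRootFold rest o]
    rfl

-- ===== VERDICT (by name: the statement is the Claim_ definition above) =====
theorem solution_spec : Claim_equal_solution := by
  intro nodeinfo hDom hPre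
  unfold Spec_solution
  obtain ⟨hne, _, _⟩ := hPre
  simp only [solution, solution_alt]
  have hnn : ∀ nd ∈ pvSortDesc (pvItems nodeinfo), 0 ≤ nd.1.1 :=
    fun nd h => pvItems_h_nonneg _ _ (pvMem_sortDesc _ _ h)
  have hone : pvSortDesc (pvItems nodeinfo) ≠ [] := by
    intro hnil
    have := pvLength_sortDesc (pvItems nodeinfo)
    rw [hnil] at this
    simp [pvItems, PySem.List.length_enumerate] at this
    exact hne (List.eq_nil_of_length_eq_zero this.symm)
  rw [pvRoot_eq _ hone hnn]
  obtain ⟨dA', heq, -⟩ := pvDfs_from_loop _ (pvLoop_eq _)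
    ((PySem.List.max? (pvSortDesc (pvItems nodeinfo)) (fun nd => nd.1.1)).getD pvDummy)
    (-1) (10 ^ 9) _ _ [] [] (pvPoolInit _ hnn)
  rw [heq]
  simp
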